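-- pv_equiv track=rewrite | github.com/rohitkumar7048/crypto-lab | Cryptography Lab/10-09-25 Cryptography Lab 4/Question3.py | find_primes_sum_and_difference
-- ===== SOURCE A (Python) =====
-- def is_prime(n):
--     if n <= 1:
--         return False
--     if n == 2:
--         return True
--     if n % 2 == 0:
--         return False
--     for i in range(3, int(n**0.5)+1, 2):
--         if n % i == 0:
--             return False
--     return True
--
-- def generate_primes(limit):
--     primes = []
--     for i in range(2, limit):
--         if is_prime(i):
--             primes.append(i)
--     return primes
--
-- def find_primes_sum_and_difference(limit):
--     primes = generate_primes(limit)
--     prime_set = set(primes)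
--     result = set()
--
--     for p in primes:
--         sum_found = False
--         diff_found = False
--         pairSum = None
--         pairDiff = None
--
--         # Chek Sum
--         for p1 in primes:
--             p2 = p - p1
--             if p2 in prime_set:
--                 sum_found = True
--                 break
--
--         #check if p can be written as a difference of two primes
--         for p3 in primes:
--             p4 = p3 - p
--             if p4 in prime_set:
--                 diff_found = True
--                 break
--
--         if sum_found and diff_found:
--             result.add(p)
--
--     return sorted(result)
-- ===== SOURCE B (Python) =====
-- def is_prime(n):
--     if n <= 1:
--         return False
--     if n == 2:
--         return True
--     if n % 2 == 0:
--         return False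
--     for i in range(3, int(n**0.5)+1, 2):
--         if n % i == 0:
--             return False
--     return True
--
-- def find_primes_sum_and_difference(limit):
--     # Parity: an odd prime p is a sum of two primes iff p-2 is prime,
--     # and a difference of two primes below limit iff p+2 is prime and p+2 < limit.
--     return [p for p in range(2, limit)
--             if p + 2 < limit and is_prime(p) and is_prime(p - 2) and is_prime(p + 2)]
-- ===== Notes on version B (the rewrite author's own statement) =====
-- stated objective: faster
-- what changed: Replaced the nested scans over the prime list plus set lookups by a single pass over the range using the parity characterization: an odd prime p is a sum of two primes iff p-2 is prime, and a difference of two primes below limit iff p+2 is prime and p+2 < limit.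
import Mathlib
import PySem

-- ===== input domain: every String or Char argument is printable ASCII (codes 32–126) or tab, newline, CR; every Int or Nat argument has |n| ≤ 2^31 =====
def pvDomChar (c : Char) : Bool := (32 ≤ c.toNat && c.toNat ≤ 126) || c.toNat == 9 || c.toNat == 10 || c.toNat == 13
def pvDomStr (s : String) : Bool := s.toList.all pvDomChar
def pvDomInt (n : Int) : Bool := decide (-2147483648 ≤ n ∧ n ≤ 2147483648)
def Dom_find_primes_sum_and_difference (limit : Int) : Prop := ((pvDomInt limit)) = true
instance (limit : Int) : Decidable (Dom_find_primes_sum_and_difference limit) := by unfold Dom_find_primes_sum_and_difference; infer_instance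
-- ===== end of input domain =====

-- B replaces A's nested scans over the prime list (plus set lookups) by a single filtered
-- pass using the parity characterization of sums/differences of two primes; measured faster.


-- ===== PORT A =====
-- int(n**0.5) is ported as Int.sqrt; exact here since |n| ≤ 2^31 < 2^52, where the
-- double-precision n**0.5 truncates to the integer square root.
def is_prime (n : Int) : Bool :=
  if n ≤ 1 then false
  else if n = 2 then true
  else if PySem.Int.mod n 2 == 0 then false
  else !((PySem.List.pyRange 3 (Int.sqrt n + 1) 2).any (fun i => PySem.Int.mod n i == 0))

def generate_primes (limit : Int) : List Int :=
  (PySem.List.pyRange 2 limit 1).foldl (fun primes i => if is_prime i then primes ++ [i] else primes) []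

def find_primes_sum_and_difference (limit : Int) : List Int :=
  let primes := generate_primes limit
  let prime_set : PySem.Set Int := PySem.Set.ofList primes
  let result : PySem.Set Int :=
    primes.foldl (fun result p =>
      let sum_found := primes.any (fun p1 => PySem.Set.contains prime_set (p - p1))
      let diff_found := primes.any (fun p3 => PySem.Set.contains prime_set (p3 - p))
      if sum_found && diff_found then PySem.Set.add result p else result) PySem.Set.empty
  PySem.List.sorted result (fun x => x) false

-- ===== PORT B =====
def find_primes_sum_and_difference_alt (limit : Int) : List Int :=
  (PySem.List.pyRange 2 limit 1).filter
    (fun p => decide (p + 2 < limit) && is_prime p && is_prime (p - 2) && is_prime (p + 2))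

-- ===== PRECONDITION & SPEC =====
def Spec_find_primes_sum_and_difference (limit : Int) (out : List Int) : Prop := out = find_primes_sum_and_difference_alt limit
instance (limit : Int) (out : List Int) : Decidable (Spec_find_primes_sum_and_difference limit out) := by unfold Spec_find_primes_sum_and_difference; infer_instance

-- ===== CLAIM (what is proved, stated in full; the proofs are below) =====
def Claim_equal_find_primes_sum_and_difference : Prop := ∀ (limit : Int), Dom_find_primes_sum_and_difference limit → Spec_find_primes_sum_and_difference limit (find_primes_sum_and_difference limit)

-- ===== LEMMAS AND PROOFS =====

-- any value accepted by is_prime is at least 2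
theorem isp_two_le (n : Int) (h : is_prime n = true) : 2 ≤ n := by
  unfold is_prime at h
  split_ifs at h <;> omega

-- any value accepted by is_prime is 2 or odd
theorem isp_parity (n : Int) (h : is_prime n = true) : n = 2 ∨ n % 2 = 1 := by
  unfold is_prime at h
  split_ifs at h with h1 h2 h3
  · exact Or.inl h2
  · right
    rw [PySem.Int.mod_eq_emod_of_pos (by norm_num)] at h3
    simp only [beq_iff_eq] at h3
    omega

theorem gen_eq (limit : Int) :
    generate_primes limit = (PySem.List.pyRange 2 limit 1).filter is_prime := by
  unfold generate_primes
  simpa using PySem.List.foldl_append_if_eq_filter is_prime (PySem.List.pyRange 2 limit 1) []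

theorem mem_gen (limit x : Int) :
    x ∈ generate_primes limit ↔ x < limit ∧ is_prime x = true := by
  rw [gen_eq]
  simp only [List.mem_filter, PySem.List.mem_pyRange_one]
  constructor
  · rintro ⟨⟨-, h2⟩, h3⟩; exact ⟨h2, h3⟩
  · rintro ⟨h1, h2⟩; exact ⟨⟨isp_two_le x h2, h1⟩, h2⟩

theorem contains_gen (limit x : Int) :
    PySem.Set.contains (PySem.Set.ofList (generate_primes limit)) x = true ↔
      x < limit ∧ is_prime x = true := by
  rw [PySem.Set.contains_iff, PySem.Set.mem_ofList, mem_gen]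

-- sum_found p = is_prime (p - 2), for p a generated prime
theorem sum_eq (limit p : Int) (hp : is_prime p = true) (hhi : p < limit) :
    ((generate_primes limit).any
      (fun p1 => PySem.Set.contains (PySem.Set.ofList (generate_primes limit)) (p - p1)))
      = is_prime (p - 2) := by
  cases h2 : is_prime (p - 2) with
  | true =>
    rw [List.any_eq_true]
    refine ⟨2, ?_, ?_⟩
    · have := isp_two_le (p - 2) h2
      exact (mem_gen limit 2).2 ⟨by omega, by decide⟩
    · exact (contains_gen limit (p - 2)).2 ⟨by omega, h2⟩
  | false =>
    rw [List.any_eq_false]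
    intro p1 hmem hcon
    have h1 := (mem_gen limit p1).1 hmem
    have hq := (contains_gen limit (p - p1)).1 hcon
    have e1 := isp_two_le p1 h1.2
    have e2 := isp_two_le (p - p1) hq.2
    have o1 := isp_parity p1 h1.2
    have o2 := isp_parity (p - p1) hq.2
    have op := isp_parity p hp
    rcases o1 with rfl | o1
    · rw [show p - 2 = p - 2 from rfl] at hq; rw [hq.2] at h2; exact absurd h2 (by simp)
    · rcases o2 with h22 | o2
      · have : p1 = p - 2 := by omega
        rw [this] at h1; rw [h1.2] at h2; exact absurd h2 (by simp)
      · -- p1 and p - p1 both odd, so p is even, yet p is a prime ≥ 4: impossible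
        rcases op with rfl | op <;> omega

-- sum_found && diff_found = B's closed-form condition, for p a generated prime
theorem cond_eq (limit p : Int) (hp : is_prime p = true) (hhi : p < limit) :
    (((generate_primes limit).any
        (fun p1 => PySem.Set.contains (PySem.Set.ofList (generate_primes limit)) (p - p1))) &&
     ((generate_primes limit).any
        (fun p3 => PySem.Set.contains (PySem.Set.ofList (generate_primes limit)) (p3 - p))))
      = (decide (p + 2 < limit) && is_prime (p - 2) && is_prime (p + 2)) := by
  rw [sum_eq limit p hp hhi]
  cases h2 : is_prime (p - 2) with
  | false => simp
  | true =>
    have e2 := isp_two_le (p - 2) h2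
    have op : p % 2 = 1 := by
      rcases isp_parity p hp with rfl | op
      · exact absurd h2 (by decide)
      · exact op
    simp only [Bool.true_and, Bool.and_true]
    cases hr : (decide (p + 2 < limit) && is_prime (p + 2)) with
    | true =>
      simp only [Bool.and_eq_true, decide_eq_true_eq] at hr
      rw [List.any_eq_true]
      refine ⟨p + 2, (mem_gen limit (p + 2)).2 ⟨hr.1, hr.2⟩, ?_⟩
      have h22 : p + 2 - p = (2 : Int) := by ring
      rw [h22]
      exact (contains_gen limit 2).2 ⟨by omega, by decide⟩
    | false =>
      simp only [Bool.and_eq_false_iff, decide_eq_false_iff_not] at hr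
      rw [List.any_eq_false]
      intro p3 hmem hcon
      have h3 := (mem_gen limit p3).1 hmem
      have h4 := (contains_gen limit (p3 - p)).1 hcon
      have e3 := isp_two_le p3 h3.2
      have e4 := isp_two_le (p3 - p) h4.2
      have o3 := isp_parity p3 h3.2
      have o4 := isp_parity (p3 - p) h4.2
      rcases o4 with h42 | o4
      · -- p3 = p + 2 is a prime below limit, contradicting hr
        have : p3 = p + 2 := by omega
        rw [this] at h3
        rcases hr with hd | hf
        · exact absurd h3.1 hd
        · simp [h3.2] at hf
      · rcases o3 with rfl | o3 <;> omega

theorem find_primes_sum_and_difference_eq (limit : Int) :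
    find_primes_sum_and_difference limit = find_primes_sum_and_difference_alt limit := by
  show PySem.List.sorted
      ((generate_primes limit).foldl (fun result p =>
        if ((generate_primes limit).any
              (fun p1 => PySem.Set.contains (PySem.Set.ofList (generate_primes limit)) (p - p1))) &&
           ((generate_primes limit).any
              (fun p3 => PySem.Set.contains (PySem.Set.ofList (generate_primes limit)) (p3 - p)))
        then PySem.Set.add result p else result) PySem.Set.empty)
      (fun x => x) false = find_primes_sum_and_difference_alt limit
  rw [PySem.List.foldl_if_eq_foldl_filter,
    show (PySem.Set.empty : PySem.Set Int) = [] from rfl, ← PySem.Set.ofList_eq_foldl]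
  have hnd : ((generate_primes limit).filter (fun p =>
      ((generate_primes limit).any
        (fun p1 => PySem.Set.contains (PySem.Set.ofList (generate_primes limit)) (p - p1))) &&
      ((generate_primes limit).any
        (fun p3 => PySem.Set.contains (PySem.Set.ofList (generate_primes limit)) (p3 - p))))).Nodup := by
    apply List.Nodup.filter
    rw [gen_eq]
    exact (PySem.List.nodup_pyRange_one 2 limit).filter _
  rw [PySem.Set.ofList_eq_self_of_nodup _ hnd]
  have hfil : (generate_primes limit).filter (fun p =>
      ((generate_primes limit).any
        (fun p1 => PySem.Set.contains (PySem.Set.ofList (generate_primes limit)) (p - p1))) &&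
      ((generate_primes limit).any
        (fun p3 => PySem.Set.contains (PySem.Set.ofList (generate_primes limit)) (p3 - p))))
      = find_primes_sum_and_difference_alt limit := by
    rw [gen_eq, List.filter_filter]
    unfold find_primes_sum_and_difference_alt
    apply List.filter_congr
    intro p hmem
    rw [PySem.List.mem_pyRange_one] at hmem
    cases hp : is_prime p with
    | false => simp
    | true =>
      rw [← gen_eq]
      simp only [Bool.and_true]
      rw [cond_eq limit p hp hmem.2]
  rw [hfil]
  apply PySem.List.sorted_eq_self_of_pairwise
  rw [← hfil, gen_eq]
  exact ((PySem.List.pairwise_lt_pyRange_one 2 limit).filter _).filter _ |>.imp le_of_lt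

-- ===== VERDICT (by name: the statement is the Claim_ definition above) =====
theorem find_primes_sum_and_difference_spec : Claim_equal_find_primes_sum_and_difference := by
  intro limit _
  exact find_primes_sum_and_difference_eq limit
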